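-- pv_equiv track=rewrite | github.com/tomroadnight/AdventOfCode2021 | src/day19.py | grid_transformations
-- ===== SOURCE A (Python) =====
-- import typing
-- from itertools import permutations
--
-- def grid_transformations(a: typing.List[typing.Tuple[int, int, int]], b_orig: typing.List[typing.Tuple[int, int, int]]) -> typing.Tuple[bool, typing.Optional[typing.List[typing.Tuple[int,int, int]]], typing.Optional[typing.Tuple[int,int, int]]]:
--     for axis, flip in ((axis, flip) for axis in permutations((0, 1, 2)) for flip in ((-1, -1, -1), (-1, -1, 1), (-1, 1, -1), (-1, 1, 1), (1, -1, -1), (1, -1, 1), (1, 1, -1), (1, 1, 1))):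
--         b = [(_b[axis[0]] * flip[0], _b[axis[1]] * flip[1], _b[axis[2]] * flip[2]) for _b in b_orig]
--         for pos_a in a:
--             for pos_b in b:
--                 delta = (pos_b[0] - pos_a[0], pos_b[1]-pos_a[1], pos_b[2]-pos_a[2])
--
--                 succ_maps = [(pos_revert_b[0] - delta[0], pos_revert_b[1] - delta[1], pos_revert_b[2] - delta[2]) for pos_revert_b in b]
--
--                 if sum([x in a for x in succ_maps]) >= 12:
--                     return True, succ_maps, delta
--
--     return False, None, None
-- ===== SOURCE B (Python) =====
-- import typing
--
-- _PERMS = ((0, 1, 2), (0, 2, 1), (1, 0, 2), (1, 2, 0), (2, 0, 1), (2, 1, 0))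
--
--
-- def _first_match(a, b, hits):
--     # first (pos_a, pos_b) pair in scan order whose delta has >= 12 counted hits
--     for pa in a:
--         for pb in b:
--             d = (pb[0] - pa[0], pb[1] - pa[1], pb[2] - pa[2])
--             if hits.get(d, 0) >= 12:
--                 return d
--     return None
--
--
-- def grid_transformations(a: typing.List[typing.Tuple[int, int, int]], b_orig: typing.List[typing.Tuple[int, int, int]]) -> typing.Tuple[bool, typing.Optional[typing.List[typing.Tuple[int, int, int]]], typing.Optional[typing.Tuple[int, int, int]]]:
--     # Per orientation: one hash-map pass counts, for each candidate delta, how many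
--     # beacons of the oriented b land on a distinct beacon of a; then the pair scan is
--     # a single dictionary lookup per pair instead of a full membership recount.
--     a_set = set(a)
--     for code in range(48):
--         px, py, pz = _PERMS[code // 8]
--         sx = 1 if (code // 4) % 2 else -1
--         sy = 1 if (code // 2) % 2 else -1
--         sz = 1 if code % 2 else -1
--         b = [(p[px] * sx, p[py] * sy, p[pz] * sz) for p in b_orig]
--         hits = {}
--         for pb in b:
--             for pa in a_set:
--                 d = (pb[0] - pa[0], pb[1] - pa[1], pb[2] - pa[2])
--                 hits[d] = hits.get(d, 0) + 1
--         d = _first_match(a, b, hits)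
--         if d is not None:
--             return True, [(q[0] - d[0], q[1] - d[1], q[2] - d[2]) for q in b], d
--     return False, None, None
-- ===== Notes on version B (the rewrite author's own statement) =====
-- stated objective: faster
-- what changed: Instead of recounting matches with a full |b|x|a| membership scan for every candidate (pos_a, pos_b) pair, B hardcodes the 48 orientations as a perm-table plus arithmetic sign bits, builds one per-orientation hash map counting for each delta how many oriented-b beacons land on a distinct beacon of a, and a helper scans pairs for the first delta with >= 12 hits.
import Mathlib
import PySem

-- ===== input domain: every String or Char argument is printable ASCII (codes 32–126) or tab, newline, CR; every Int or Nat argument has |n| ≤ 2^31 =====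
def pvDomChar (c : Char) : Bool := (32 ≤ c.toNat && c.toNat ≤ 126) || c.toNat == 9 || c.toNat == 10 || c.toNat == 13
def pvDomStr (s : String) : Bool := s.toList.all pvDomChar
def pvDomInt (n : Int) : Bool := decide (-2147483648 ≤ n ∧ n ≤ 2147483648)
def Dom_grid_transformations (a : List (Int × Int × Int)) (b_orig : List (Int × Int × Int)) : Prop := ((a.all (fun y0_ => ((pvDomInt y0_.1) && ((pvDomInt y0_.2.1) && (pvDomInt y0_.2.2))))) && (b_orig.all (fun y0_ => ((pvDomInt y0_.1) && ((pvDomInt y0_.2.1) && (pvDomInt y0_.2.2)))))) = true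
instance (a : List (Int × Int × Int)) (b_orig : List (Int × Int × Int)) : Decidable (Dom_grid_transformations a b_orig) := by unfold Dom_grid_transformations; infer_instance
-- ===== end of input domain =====

-- B replaces A's per-pair recount of matches (an inner |b|·|a| membership scan for EVERY (pos_a, pos_b)
-- pair) by one per-orientation dictionary counting matches per delta (over the distinct points of a),
-- with the 48 orientations generated from a 6-entry permutation table and arithmetic sign bits, and the
-- winning pair found by a helper doing one dictionary lookup per pair: same result, asymptotically fewer
-- operations per orientation.

-- ===== PORT A =====
-- Python tuple indexing p[i]; exact for i ∈ {0,1,2}, the only indices the permutations of (0,1,2) produce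
def pvTupGet (p : Int × Int × Int) (i : Int) : Int :=
  if i = 0 then p.1 else if i = 1 then p.2.1 else p.2.2

def pvSub (p q : Int × Int × Int) : Int × Int × Int :=
  (p.1 - q.1, p.2.1 - q.2.1, p.2.2 - q.2.2)

-- A's orientation generator: permutations((0,1,2)) × the 8 flip tuples, in Python's order
def pvOrients : List (List Int × (Int × Int × Int)) :=
  (PySem.List.permutations ([0, 1, 2] : List Int) 3).flatMap (fun axis =>
    ([(-1, -1, -1), (-1, -1, 1), (-1, 1, -1), (-1, 1, 1), (1, -1, -1), (1, -1, 1), (1, 1, -1), (1, 1, 1)] :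
      List (Int × Int × Int)).map (fun flip => (axis, flip)))

def pvApply (axis : List Int) (flip : Int × Int × Int) (p : Int × Int × Int) : Int × Int × Int :=
  (pvTupGet p (PySem.List.pyGetD axis 0 0) * flip.1,
   pvTupGet p (PySem.List.pyGetD axis 1 0) * flip.2.1,
   pvTupGet p (PySem.List.pyGetD axis 2 0) * flip.2.2)

-- A's body for one oriented b: for pos_a in a: for pos_b in b: recount matches of b - delta in a; return at >= 12
def pvAOrient (a b : List (Int × Int × Int)) : Option (List (Int × Int × Int) × (Int × Int × Int)) :=
  a.findSome? (fun pos_a => b.findSome? (fun pos_b =>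
    let delta := pvSub pos_b pos_a
    let succ_maps := b.map (fun pos_revert_b => pvSub pos_revert_b delta)
    if 12 ≤ (succ_maps.map (fun x => if x ∈ a then (1 : Int) else 0)).sum then
      some (succ_maps, delta)
    else none))

def grid_transformations (a : List (Int × Int × Int)) (b_orig : List (Int × Int × Int)) : Bool × (Option (List (Int × Int × Int))) × (Option (Int × Int × Int)) :=
  match pvOrients.findSome? (fun af => pvAOrient a (b_orig.map (pvApply af.1 af.2))) with
  | some (succ_maps, delta) => (true, some succ_maps, some delta)
  | none => (false, none, none)

-- ===== PORT B =====
-- B's module-level _PERMS table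
def bPerms : List (Int × Int × Int) :=
  [(0, 1, 2), (0, 2, 1), (1, 0, 2), (1, 2, 0), (2, 0, 1), (2, 1, 0)]

-- p[k] for k ∈ {0,1,2} (the only values bPerms holds)
def bComp (p : Int × Int × Int) (k : Int) : Int :=
  if k = 0 then p.1 else if k = 1 then p.2.1 else p.2.2

-- '1 if t else -1' on an int t
def bSign (t : Int) : Int := if t = 0 then -1 else 1

-- orientation number code ∈ range(48) → the transform (perm from the table, signs from the bits of code)
def bXf (code : Int) (p : Int × Int × Int) : Int × Int × Int :=
  (bComp p (PySem.List.pyGetD bPerms (PySem.Int.floordiv code 8) (0, 0, 0)).1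
     * bSign (PySem.Int.mod (PySem.Int.floordiv code 4) 2),
   bComp p (PySem.List.pyGetD bPerms (PySem.Int.floordiv code 8) (0, 0, 0)).2.1
     * bSign (PySem.Int.mod (PySem.Int.floordiv code 2) 2),
   bComp p (PySem.List.pyGetD bPerms (PySem.Int.floordiv code 8) (0, 0, 0)).2.2
     * bSign (PySem.Int.mod code 2))

-- hits: for each delta, how many beacons of b land on a distinct beacon of a
def bHits (aset b : List (Int × Int × Int)) : PySem.Dict (Int × Int × Int) Int :=
  b.foldl (fun h pb => aset.foldl (fun h pa =>
    h.insert (pb.1 - pa.1, pb.2.1 - pa.2.1, pb.2.2 - pa.2.2)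
      (h.getD (pb.1 - pa.1, pb.2.1 - pa.2.1, pb.2.2 - pa.2.2) 0 + 1)) h) PySem.Dict.empty

-- _first_match, inner loop: first pb in b whose delta to pa has >= 12 hits
def bFirstInner (hits : PySem.Dict (Int × Int × Int) Int) (pa : Int × Int × Int) :
    List (Int × Int × Int) → Option (Int × Int × Int)
  | [] => none
  | pb :: rest =>
    if 12 ≤ hits.getD (pb.1 - pa.1, pb.2.1 - pa.2.1, pb.2.2 - pa.2.2) 0 then
      some (pb.1 - pa.1, pb.2.1 - pa.2.1, pb.2.2 - pa.2.2)
    else bFirstInner hits pa rest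

-- _first_match, outer loop over a
def bFirst (hits : PySem.Dict (Int × Int × Int) Int) (b : List (Int × Int × Int)) :
    List (Int × Int × Int) → Option (Int × Int × Int)
  | [] => none
  | pa :: rest =>
    match bFirstInner hits pa b with
    | some d => some d
    | none => bFirst hits b rest

def grid_transformations_alt (a : List (Int × Int × Int)) (b_orig : List (Int × Int × Int)) : Bool × (Option (List (Int × Int × Int))) × (Option (Int × Int × Int)) :=
  let a_set := PySem.Set.ofList a
  match (PySem.List.pyRange 0 48 1).findSome? (fun code =>
      let b := b_orig.map (bXf code)
      (bFirst (bHits a_set b) b a).map (fun d =>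
        (b.map (fun q => (q.1 - d.1, q.2.1 - d.2.1, q.2.2 - d.2.2)), d))) with
  | some (m, d) => (true, some m, some d)
  | none => (false, none, none)

-- ===== PRECONDITION & SPEC =====
def Spec_grid_transformations (a : List (Int × Int × Int)) (b_orig : List (Int × Int × Int)) (out : Bool × (Option (List (Int × Int × Int))) × (Option (Int × Int × Int))) : Prop := out = grid_transformations_alt a b_orig
instance (a : List (Int × Int × Int)) (b_orig : List (Int × Int × Int)) (out : Bool × (Option (List (Int × Int × Int))) × (Option (Int × Int × Int))) : Decidable (Spec_grid_transformations a b_orig out) := by unfold Spec_grid_transformations; infer_instance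

-- ===== CLAIM (what is proved, stated in full; the proofs are below) =====
def Claim_equal_grid_transformations : Prop := ∀ (a : List (Int × Int × Int)) (b_orig : List (Int × Int × Int)), Dom_grid_transformations a b_orig → Spec_grid_transformations a b_orig (grid_transformations a b_orig)

-- ===== LEMMAS AND PROOFS =====

-- the two orientation sequences produce the same 48 oriented copies of b_orig
theorem orient_maps_eq (b_orig : List (Int × Int × Int)) :
    pvOrients.map (fun af => b_orig.map (pvApply af.1 af.2))
      = (PySem.List.pyRange 0 48 1).map (fun code => b_orig.map (bXf code)) := by
  rfl

-- Option.map pushed through findSome?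
theorem findSome?_option_map {α β γ : Type} (l : List α) (f : α → Option β) (g : β → γ) :
    (l.findSome? f).map g = l.findSome? (fun x => (f x).map g) := by
  induction l with
  | nil => rfl
  | cons x xs ih => cases hx : f x <;> simp [hx, ih]

-- pb - pa = d  ↔  pa = pb - d  (as a Bool equation, for rewriting under countP)
theorem pvSub_beq (pb pa d : Int × Int × Int) :
    ((pvSub pb pa == d) = (pa == pvSub pb d)) := by
  have h : (pvSub pb pa = d) ↔ (pa = pvSub pb d) := by
    simp only [pvSub, Prod.ext_iff]
    omega
  rw [beq_eq_decide, beq_eq_decide]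
  exact decide_eq_decide.mpr h

-- B's counter: getD d = number of pb ∈ b with pb - d ∈ a
theorem bHits_getD (a b : List (Int × Int × Int)) (d : Int × Int × Int) :
    (bHits (PySem.Set.ofList a) b).getD d 0
      = (b.countP (fun pb => decide (pvSub pb d ∈ a)) : Int) := by
  have key : ∀ (aD : List (Int × Int × Int)), aD.Nodup →
      ∀ (b : List (Int × Int × Int)) (h0 : PySem.Dict (Int × Int × Int) Int) (d : Int × Int × Int),
      (b.foldl (fun h pb => aD.foldl (fun h pa =>
        h.insert (pvSub pb pa) (h.getD (pvSub pb pa) 0 + 1)) h) h0).getD d 0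
      = h0.getD d 0 + (b.countP (fun pb => decide (pvSub pb d ∈ aD)) : Int) := by
    intro aD hnd b
    induction b with
    | nil => simp
    | cons pb rest ih =>
      intro h0 d
      simp only [List.foldl_cons, ih, List.countP_cons]
      have hinner : (aD.foldl (fun h pa =>
          h.insert (pvSub pb pa) (h.getD (pvSub pb pa) 0 + 1)) h0).getD d 0
          = h0.getD d 0 + (aD.count (pvSub pb d) : Int) := by
        have hmap := PySem.Dict.getD_foldl_insert_add_one (aD.map (fun pa => pvSub pb pa)) h0 d
        rw [List.foldl_map] at hmap
        rw [hmap]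
        congr 1
        simp only [List.count, List.countP_map]
        refine congrArg _ (List.countP_congr ?_)
        intro pa _
        simp only [Function.comp_apply, pvSub_beq]
      rw [hinner]
      by_cases hm : pvSub pb d ∈ aD
      · rw [List.count_eq_one_of_mem hnd hm]
        simp [hm]
        ring
      · rw [List.count_eq_zero_of_not_mem hm]
        simp [hm]
  have h := key (PySem.Set.ofList a) (PySem.Set.nodup_ofList a) b PySem.Dict.empty d
  simp only [PySem.Dict.getD_empty, zero_add, PySem.Set.mem_ofList] at h
  exact h

-- bFirst is the nested findSome? over a then b
theorem bFirstInner_eq (hits : PySem.Dict (Int × Int × Int) Int) (pa : Int × Int × Int)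
    (b : List (Int × Int × Int)) :
    bFirstInner hits pa b = b.findSome? (fun pb =>
      if 12 ≤ hits.getD (pvSub pb pa) 0 then some (pvSub pb pa) else none) := by
  induction b with
  | nil => rfl
  | cons pb rest ih =>
    rw [show bFirstInner hits pa (pb :: rest)
        = (if 12 ≤ hits.getD (pvSub pb pa) 0 then some (pvSub pb pa) else bFirstInner hits pa rest)
      from rfl, ih]
    by_cases hc : 12 ≤ hits.getD (pvSub pb pa) 0 <;> simp [hc]

theorem bFirst_eq (hits : PySem.Dict (Int × Int × Int) Int) (b a : List (Int × Int × Int)) :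
    bFirst hits b a = a.findSome? (fun pa => bFirstInner hits pa b) := by
  induction a with
  | nil => rfl
  | cons pa rest ih =>
    simp only [bFirst, List.findSome?_cons, ih]
    cases bFirstInner hits pa b <;> rfl

-- per oriented copy of b, A's rescan and B's counter+scan agree (payload included)
theorem orient_core (a b : List (Int × Int × Int)) :
    pvAOrient a b = (bFirst (bHits (PySem.Set.ofList a) b) b a).map (fun d =>
      (b.map (fun q => (q.1 - d.1, q.2.1 - d.2.1, q.2.2 - d.2.2)), d)) := by
  unfold pvAOrient
  rw [bFirst_eq, findSome?_option_map]
  refine congrArg (List.findSome? · a) (funext fun pos_a => ?_)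
  rw [bFirstInner_eq, findSome?_option_map]
  refine congrArg (List.findSome? · b) (funext fun pos_b => ?_)
  have hcnt := bHits_getD a b (pvSub pos_b pos_a)
  have hA := PySem.List.sum_map_ite_one_zero (fun x => decide (x ∈ a))
      (b.map (fun pos_revert_b => pvSub pos_revert_b (pvSub pos_b pos_a)))
  simp only [decide_eq_true_iff] at hA
  simp only []
  rw [hA, List.countP_map, hcnt]
  simp only [Function.comp_def]
  split <;> rfl

-- ===== VERDICT (by name: the statement is the Claim_ definition above) =====
theorem grid_transformations_spec : Claim_equal_grid_transformations := by
  intro a b_orig _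
  unfold Spec_grid_transformations grid_transformations grid_transformations_alt
  have h1 := congrArg (fun L => L.findSome? (pvAOrient a)) (orient_maps_eq b_orig)
  simp only [List.findSome?_map] at h1
  simp only [Function.comp_def] at h1
  rw [h1]
  simp only [orient_core]
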